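-- pv_equiv track=rewrite | github.com/ucv-cs/Logica-computationala | propositions.py | get_proposition_type
-- ===== SOURCE A (Python) =====
-- def get_proposition_type(table):
-- 	"""
-- 	Află ce fel de propoziție complexă este cea a cărei tabelă de adevăr
-- 	este introdusă
-- 	 param table: tabela de adevăr
-- 	 return: text cu felul propoziției
-- 	 rtype: string
-- 	"""
-- 	last_column = []
-- 	j = len(table[1]) - 1
-- 	for i in range(1, len(table)):
-- 		last_column += [table[i][j]]
--
-- 	result = ''
-- 	if False not in last_column:
-- 		result = 'validă (tautologie, deci și satisfiabilă)'
-- 	elif True not in last_column: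
-- 		result = 'contradicție (nesatisfiabilă)'
-- 	elif True in last_column:
-- 		result = 'satisfiabilă' #nu va arăta acest rezultat niciodată... :)
-- 		if False in last_column:
-- 			result = 'contingentă (deci și satisfiabilă)'
--
-- 	return result
-- ===== SOURCE B (Python) =====
-- def get_proposition_type(table):
-- 	"""
-- 	Single pass over the rows accumulating two flags instead of
-- 	materialising the last column and scanning it for membership.
-- 	"""
-- 	j = len(table[1]) - 1
-- 	has_true = False
-- 	has_false = False
-- 	for row in table[1:]:
-- 		if row[j]:
-- 			has_true = True
-- 		else:
-- 			has_false = True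
-- 	if not has_false:
-- 		return 'validă (tautologie, deci și satisfiabilă)'
-- 	if not has_true:
-- 		return 'contradicție (nesatisfiabilă)'
-- 	return 'contingentă (deci și satisfiabilă)'
-- ===== Notes on version B (the rewrite author's own statement) =====
-- stated objective: simpler
-- what changed: B makes one pass over the rows accumulating two boolean flags (has_true/has_false) and classifies with an early-return chain, instead of building the last-column list and scanning it up to four times for membership.
import Mathlib
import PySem

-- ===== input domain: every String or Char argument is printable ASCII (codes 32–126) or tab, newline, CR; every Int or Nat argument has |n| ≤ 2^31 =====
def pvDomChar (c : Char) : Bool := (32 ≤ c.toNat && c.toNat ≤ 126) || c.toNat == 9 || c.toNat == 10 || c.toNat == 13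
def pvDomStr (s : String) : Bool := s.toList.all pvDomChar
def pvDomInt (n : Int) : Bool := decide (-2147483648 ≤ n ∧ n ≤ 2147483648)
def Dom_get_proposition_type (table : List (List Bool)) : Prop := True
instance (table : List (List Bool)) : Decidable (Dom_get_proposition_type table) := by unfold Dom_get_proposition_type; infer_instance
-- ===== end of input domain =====

-- B replaces the last-column list and its repeated membership scans by one pass
-- accumulating two flags; objective: simpler.

-- ===== PORT A =====
def get_proposition_type (table : List (List Bool)) : String :=
  let j : Int := ((PySem.List.pyGetD table 1 []).length : Int) - 1
  let last_column : List Bool :=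
    (PySem.List.pyRange 1 table.length 1).foldl
      (fun acc i => acc ++ [PySem.List.pyGetD (PySem.List.pyGetD table i []) j false]) []
  let result : String := ""
  if ¬ (false ∈ last_column) then "validă (tautologie, deci și satisfiabilă)"
  else if ¬ (true ∈ last_column) then "contradicție (nesatisfiabilă)"
  else if true ∈ last_column then
    (if false ∈ last_column then "contingentă (deci și satisfiabilă)" else "satisfiabilă")
  else result

-- ===== PORT B =====
def get_proposition_type_alt (table : List (List Bool)) : String :=
  let j : Int := ((PySem.List.pyGetD table 1 []).length : Int) - 1
  let flags : Bool × Bool :=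
    (table.drop 1).foldl
      (fun (st : Bool × Bool) row =>
        if PySem.List.pyGetD row j false then (true, st.2) else (st.1, true))
      (false, false)
  if !flags.2 then "validă (tautologie, deci și satisfiabilă)"
  else if !flags.1 then "contradicție (nesatisfiabilă)"
  else "contingentă (deci și satisfiabilă)"

-- ===== PRECONDITION & SPEC =====
-- Pre_ excludes exactly the inputs where A raises: tables with fewer than two rows
-- (table[1] IndexError) and tables where some row i ≥ 1 lacks index len(table[1]) - 1.
def Pre_get_proposition_type (table : List (List Bool)) : Prop :=
  2 ≤ table.length ∧
  ∀ row ∈ table.drop 1,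
    PySem.Raise.InRange row.length (((PySem.List.pyGetD table 1 []).length : Int) - 1)
instance (table : List (List Bool)) : Decidable (Pre_get_proposition_type table) := by
  unfold Pre_get_proposition_type; infer_instance

def pvWitness_get_proposition_type : List (List Bool) := [[true, true], [true, false], [false, true]]

def Spec_get_proposition_type (table : List (List Bool)) (out : String) : Prop := out = get_proposition_type_alt table
instance (table : List (List Bool)) (out : String) : Decidable (Spec_get_proposition_type table out) := by unfold Spec_get_proposition_type; infer_instance

-- ===== CLAIM (what is proved, stated in full; the proofs are below) =====
def Claim_equal_get_proposition_type : Prop := ∀ (table : List (List Bool)), Dom_get_proposition_type table → Pre_get_proposition_type table → Spec_get_proposition_type table (get_proposition_type table)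

-- ===== LEMMAS AND PROOFS =====

-- B's flag fold, characterised: first component = "some cell true", second = "some cell false".
theorem flags_foldl_char (j : Int) (l : List (List Bool)) (st : Bool × Bool) :
    l.foldl (fun (st : Bool × Bool) row =>
        if PySem.List.pyGetD row j false then (true, st.2) else (st.1, true)) st
      = (st.1 || l.any (fun row => PySem.List.pyGetD row j false),
         st.2 || l.any (fun row => !PySem.List.pyGetD row j false)) := by
  induction l generalizing st with
  | nil => simp
  | cons r rs ih =>
    simp only [List.foldl_cons, List.any_cons]
    by_cases h : PySem.List.pyGetD r j false
    · simp [h, ih]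
    · simp [eq_false_of_ne_true h, ih]

-- A's last column is the map of the cell extractor over the rows after the first.
theorem last_column_eq (table : List (List Bool)) (j : Int) :
    (PySem.List.pyRange 1 table.length 1).foldl
      (fun acc i => acc ++ [PySem.List.pyGetD (PySem.List.pyGetD table i []) j false]) []
    = (table.drop 1).map (fun row => PySem.List.pyGetD row j false) := by
  have h := PySem.List.foldl_pyRange_pyGetD' (xs := table) (a := 1) (d := [])
      (f := fun (acc : List Bool) row => acc ++ [PySem.List.pyGetD row j false]) (init := [])
      (by norm_num)
  simp only [Int.toNat_one] at h
  rw [h, PySem.List.foldl_append_singleton_eq_map, List.nil_append]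

-- ===== VERDICT (by name: the statement is the Claim_ definition above) =====
theorem get_proposition_type_spec : Claim_equal_get_proposition_type := by
  intro table _ _
  unfold Spec_get_proposition_type get_proposition_type get_proposition_type_alt
  simp only [last_column_eq, flags_foldl_char, Bool.false_or, List.drop_one, List.mem_map]
  set j : Int := ((PySem.List.pyGetD table 1 []).length : Int) - 1 with hj
  by_cases hT : ∃ x ∈ table.tail, PySem.List.pyGetD x j false = true <;>
    by_cases hF : ∃ x ∈ table.tail, PySem.List.pyGetD x j false = false
  · have hv : ¬ ∀ x ∈ table.tail, PySem.List.pyGetD x j false = true := by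
      obtain ⟨x, hx, hfx⟩ := hF
      intro h; exact absurd (h x hx) (by simp [hfx])
    have hc : ¬ ∀ x ∈ table.tail, PySem.List.pyGetD x j false = false := by
      obtain ⟨x, hx, hfx⟩ := hT
      intro h; exact absurd (h x hx) (by simp [hfx])
    simp [hT, hF, hv, hc]
  · have hv : ∀ x ∈ table.tail, PySem.List.pyGetD x j false = true := by
      intro x hx
      cases h : PySem.List.pyGetD x j false with
      | true => rfl
      | false => exact absurd ⟨x, hx, h⟩ hF
    simp [hF, hv]
  · have hc : ∀ x ∈ table.tail, PySem.List.pyGetD x j false = false := by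
      intro x hx
      cases h : PySem.List.pyGetD x j false with
      | false => rfl
      | true => exact absurd ⟨x, hx, h⟩ hT
    have hv : ¬ ∀ x ∈ table.tail, PySem.List.pyGetD x j false = true := by
      obtain ⟨x, hx, hfx⟩ := hF
      intro h; exact absurd (h x hx) (by simp [hfx])
    simp [hT, hF, hc, hv]
  · have hv : ∀ x ∈ table.tail, PySem.List.pyGetD x j false = true := by
      intro x hx
      cases h : PySem.List.pyGetD x j false with
      | true => rfl
      | false => exact absurd ⟨x, hx, h⟩ hF
    simp [hT, hF, hv]
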